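-- pv_equiv track=rewrite | github.com/jingyulee/polymarket-alpha-bot | backend/core/steps/expand.py | is_mutually_exclusive_group
-- ===== SOURCE A (Python) =====
-- def is_mutually_exclusive_group(group: dict) -> bool:
--     """
--     Detect if a group has mutually exclusive outcomes (vs temporal progression).
--
--     Mutually exclusive groups have multiple markets with the SAME resolution date
--     but different brackets (e.g., "Presidential Election Winner" with 30 candidates).
--
--     For these groups, betting NO on one bracket (Dimon loses) does NOT mean
--     betting NO on the group outcome (no winner exists). Someone else wins.
--
--     Temporal groups have different resolution dates (e.g., "Captured by March/June/Sept").
--     For these, NO on a later date CAN validly relate to group-level implications.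
--
--     Returns:
--         True if group has mutually exclusive outcomes (skip NO expansion)
--         False if temporal or single-market group (NO expansion may be valid)
--     """
--     markets = group.get("markets", [])
--
--     if len(markets) <= 1:
--         return False  # Single market - NO on market = NO on group
--
--     # Count markets per resolution date
--     resolution_dates = {}
--     for m in markets:
--         res_date = m.get("resolution_date", "unknown")
--         resolution_dates[res_date] = resolution_dates.get(res_date, 0) + 1
--
--     # If multiple markets share any resolution date, they're mutually exclusive
--     # (e.g., 30 candidates all resolving on election day)
--     max_same_date = max(resolution_dates.values()) if resolution_dates else 0
--
--     return max_same_date > 1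
-- ===== SOURCE B (Python) =====
-- def is_mutually_exclusive_group(group: dict) -> bool:
--     """Same decision via set-uniqueness: duplicates exist iff distinct-count < total-count."""
--     markets = group.get("markets", [])
--     dates = [m.get("resolution_date", "unknown") for m in markets]
--     return len(set(dates)) < len(dates)
-- ===== Notes on version B (the rewrite author's own statement) =====
-- stated objective: idiomatic
-- what changed: Replaces the per-date count dictionary plus max-reduction (with a separate <=1 guard) by collecting the dates and comparing distinct-count against total-count with a set; the guard is subsumed by the comparison.
import Mathlib
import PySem

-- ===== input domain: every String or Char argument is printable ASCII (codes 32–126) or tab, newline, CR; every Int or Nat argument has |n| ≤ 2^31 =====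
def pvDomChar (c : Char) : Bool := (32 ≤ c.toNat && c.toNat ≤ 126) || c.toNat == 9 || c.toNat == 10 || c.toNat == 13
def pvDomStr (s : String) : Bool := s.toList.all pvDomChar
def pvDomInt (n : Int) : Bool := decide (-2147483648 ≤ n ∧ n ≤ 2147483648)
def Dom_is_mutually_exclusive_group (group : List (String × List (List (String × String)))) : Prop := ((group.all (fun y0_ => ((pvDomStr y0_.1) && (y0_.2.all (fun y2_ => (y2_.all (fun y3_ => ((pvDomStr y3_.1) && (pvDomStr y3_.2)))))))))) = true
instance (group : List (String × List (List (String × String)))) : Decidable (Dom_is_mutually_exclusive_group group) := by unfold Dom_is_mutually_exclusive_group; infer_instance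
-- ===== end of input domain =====

-- B replaces A's per-date count dict + max-reduction (and its len<=1 guard) by a
-- distinct-count vs total-count comparison over the collected dates (more idiomatic).


-- ===== PORT A =====
def is_mutually_exclusive_group (group : List (String × List (List (String × String)))) : Bool :=
  let markets := (PySem.Dict.mk group).getD "markets" []
  if markets.length ≤ 1 then false
  else
    let resolution_dates : PySem.Dict String Int :=
      markets.foldl
        (fun d m => d.modify ((PySem.Dict.mk m).getD "resolution_date" "unknown") 0 (· + 1))
        PySem.Dict.empty
    let max_same_date : Int :=
      if 0 < resolution_dates.size then
        (PySem.List.max? resolution_dates.values (fun v => v)).getD 0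
      else 0
    decide (1 < max_same_date)

-- ===== PORT B =====
def is_mutually_exclusive_group_alt (group : List (String × List (List (String × String)))) : Bool :=
  let markets := (PySem.Dict.mk group).getD "markets" []
  let dates := markets.map (fun m => (PySem.Dict.mk m).getD "resolution_date" "unknown")
  decide (PySem.Set.len (PySem.Set.ofList dates) < (dates.length : Int))

-- ===== PRECONDITION & SPEC =====
def Spec_is_mutually_exclusive_group (group : List (String × List (List (String × String)))) (out : Bool) : Prop := out = is_mutually_exclusive_group_alt group
instance (group : List (String × List (List (String × String)))) (out : Bool) : Decidable (Spec_is_mutually_exclusive_group group out) := by unfold Spec_is_mutually_exclusive_group; infer_instance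

-- ===== CLAIM (what is proved, stated in full; the proofs are below) =====
def Claim_equal_is_mutually_exclusive_group : Prop := ∀ (group : List (String × List (List (String × String)))), Dom_is_mutually_exclusive_group group → Spec_is_mutually_exclusive_group group (is_mutually_exclusive_group group)

-- ===== LEMMAS AND PROOFS =====

-- The distinct-element list of l has the cardinality of l's finset of elements.
theorem pv_len_ofList_eq_card {α : Type} [DecidableEq α] (l : List α) :
    (PySem.Set.ofList l).length = l.toFinset.card := by
  have h1 : (PySem.Set.ofList l).toFinset.card = (PySem.Set.ofList l).length :=
    List.toFinset_card_of_nodup (PySem.Set.nodup_ofList l)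
  have h2 : (PySem.Set.ofList l).toFinset = l.toFinset := by
    ext x
    simp [List.mem_toFinset, PySem.Set.mem_ofList]
  rw [← h1, h2]

-- distinct-count < total-count ↔ l has a duplicate
theorem pv_card_lt_iff {α : Type} [DecidableEq α] (l : List α) :
    l.toFinset.card < l.length ↔ ¬ l.Nodup := by
  induction l with
  | nil => simp
  | cons a t ih =>
    by_cases h : a ∈ t
    · have hm : a ∈ t.toFinset := List.mem_toFinset.mpr h
      have : (a :: t).toFinset.card = t.toFinset.card := by
        simp [List.toFinset_cons, Finset.insert_eq_self.mpr hm]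
      have hle := List.toFinset_card_le t
      simp only [List.nodup_cons]
      constructor
      · intro _ hn; exact hn.1 h
      · intro _; simp only [List.length_cons, this]; omega
    · have : (a :: t).toFinset.card = t.toFinset.card + 1 := by
        rw [List.toFinset_cons, Finset.card_insert_of_notMem (by simpa using h)]
      simp only [List.nodup_cons, this, List.length_cons]
      constructor
      · intro hlt hn; exact (ih.mp (by omega)) hn.2
      · intro hn
        have : ¬ t.Nodup := by tauto
        have := ih.mpr this
        omega

-- a nonempty list has a nonempty distinct-element list
theorem pv_ofList_ne_nil {α : Type} [BEq α] [LawfulBEq α] (l : List α) (h : l ≠ []) :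
    PySem.Set.ofList l ≠ [] := by
  cases l with
  | nil => exact absurd rfl h
  | cons a t =>
    intro hc
    have hm : a ∈ PySem.Set.ofList (a :: t) := (PySem.Set.mem_ofList _ _).mpr List.mem_cons_self
    rw [hc] at hm
    exact List.not_mem_nil hm

-- A's max-of-counts > 1 ↔ the dates list has a duplicate (dates nonempty)
theorem pv_max_count_iff {α : Type} [DecidableEq α] (l : List α) (h : l ≠ []) :
    (1 < ((PySem.List.max? ((PySem.Set.ofList l).map (fun k => (l.count k : Int))) (fun v => v)).getD 0)) ↔ ¬ l.Nodup := by
  set vs := (PySem.Set.ofList l).map (fun k => (l.count k : Int)) with hvs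
  have hvne : vs ≠ [] := by
    simpa [hvs] using pv_ofList_ne_nil l h
  obtain ⟨m, hm⟩ : ∃ m, PySem.List.max? vs (fun v => v) = some m := by
    cases hmx : PySem.List.max? vs (fun v => v) with
    | none => exact absurd ((PySem.List.max?_eq_none_iff vs _).mp hmx) hvne
    | some m => exact ⟨m, rfl⟩
  rw [hm]
  simp only [Option.getD_some]
  constructor
  · intro h1
    have hmem := PySem.List.max?_mem hm
    rw [hvs] at hmem
    obtain ⟨k, _, hk⟩ := List.mem_map.mp hmem
    rw [List.nodup_iff_count_le_one]
    push Not
    refine ⟨k, ?_⟩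
    have : (1 : Int) < (l.count k : Int) := by rw [hk]; exact h1
    exact_mod_cast this
  · intro hnd
    rw [List.nodup_iff_count_le_one] at hnd
    push Not at hnd
    obtain ⟨k, hk⟩ := hnd
    have hkl : k ∈ l := by
      rw [← List.count_pos_iff]; omega
    have hkv : ((l.count k : Int)) ∈ vs := by
      rw [hvs]
      exact List.mem_map.mpr ⟨k, (PySem.Set.mem_ofList _ _).mpr hkl, rfl⟩
    have := PySem.List.max?_isMax hm _ hkv
    simp only at this
    have : (l.count k : Int) ≤ m := this
    have h2 : (2 : Int) ≤ (l.count k : Int) := by exact_mod_cast hk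
    omega

-- length ≤ 1 lists have no duplicates
theorem pv_nodup_of_len_le_one {α : Type} (l : List α) (h : l.length ≤ 1) : l.Nodup := by
  cases l with
  | nil => simp
  | cons a t =>
    cases t with
    | nil => simp
    | cons b u => simp at h

-- ===== VERDICT (by name: the statement is the Claim_ definition above) =====
theorem is_mutually_exclusive_group_spec : Claim_equal_is_mutually_exclusive_group := by
  intro group _
  unfold Spec_is_mutually_exclusive_group is_mutually_exclusive_group is_mutually_exclusive_group_alt
  set markets := (PySem.Dict.mk group).getD "markets" [] with hmk
  set dates := markets.map (fun m => (PySem.Dict.mk m).getD "resolution_date" "unknown") with hd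
  have hlen : dates.length = markets.length := by simp [hd]
  have hB : (decide (PySem.Set.len (PySem.Set.ofList dates) < (dates.length : Int)))
      = decide (¬ dates.Nodup) := by
    apply decide_eq_decide.mpr
    unfold PySem.Set.len
    rw [Nat.cast_lt, pv_len_ofList_eq_card]
    exact pv_card_lt_iff dates
  by_cases hle : markets.length ≤ 1
  · rw [if_pos hle, hB]
    have : dates.Nodup := pv_nodup_of_len_le_one dates (by omega)
    simp [this]
  · rw [if_neg hle, hB]
    -- identify the foldl with the counter of dates
    have hfold : markets.foldl
        (fun d m => d.modify ((PySem.Dict.mk m).getD "resolution_date" "unknown") 0 (· + 1))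
        PySem.Dict.empty = PySem.Dict.counter dates := by
      rw [PySem.Dict.counter_eq_foldl, hd, List.foldl_map]
    rw [hfold]
    have hdne : dates ≠ [] := by
      intro hc
      rw [hc] at hlen
      simp at hlen
      omega
    have hitems := PySem.Dict.items_counter dates
    have hvals : (PySem.Dict.counter dates).values
        = (PySem.Set.ofList dates).map (fun k => (dates.count k : Int)) := by
      show ((PySem.Dict.counter dates).items).map Prod.snd = _
      rw [hitems, List.map_map]
      rfl
    have hsize : 0 < (PySem.Dict.counter dates).size := by
      show 0 < ((PySem.Dict.counter dates).items).length
      rw [hitems]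
      simp only [List.length_map]
      cases hs : PySem.Set.ofList dates with
      | nil => exact absurd hs (pv_ofList_ne_nil dates hdne)
      | cons x xs => simp
    show (decide (1 < if 0 < (PySem.Dict.counter dates).size then
        (PySem.List.max? (PySem.Dict.counter dates).values (fun v => v)).getD 0 else 0)) = _
    rw [if_pos hsize, hvals]
    exact decide_eq_decide.mpr (pv_max_count_iff dates hdne)
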